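-- pv_equiv track=rewrite | github.com/danilamaster1/algorithms | Les_1/task_1.py | find_sum_composition
-- ===== SOURCE A (Python) =====
-- def find_sum_composition(num):
--     sum_digit = 0
--     compos_digit = 1
--     while num > 0:
--         sum_digit += num % 10
--         compos_digit *= num % 10
--         num //= 10
--     return f'Сумма:{sum_digit}, произведение:{compos_digit}'
-- ===== SOURCE B (Python) =====
-- def find_sum_composition(num):
--     sum_digit = 0
--     compos_digit = 1
--     if num > 0:
--         for ch in str(num):
--             d = int(ch)
--             sum_digit += d
--             compos_digit *= d
--     return f'Сумма:{sum_digit}, произведение:{compos_digit}'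
-- ===== Notes on version B (the rewrite author's own statement) =====
-- stated objective: idiomatic
-- what changed: replaces the modular digit-extraction while-loop by a single pass over the decimal string str(num), converting each character back to a digit
import Mathlib
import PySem

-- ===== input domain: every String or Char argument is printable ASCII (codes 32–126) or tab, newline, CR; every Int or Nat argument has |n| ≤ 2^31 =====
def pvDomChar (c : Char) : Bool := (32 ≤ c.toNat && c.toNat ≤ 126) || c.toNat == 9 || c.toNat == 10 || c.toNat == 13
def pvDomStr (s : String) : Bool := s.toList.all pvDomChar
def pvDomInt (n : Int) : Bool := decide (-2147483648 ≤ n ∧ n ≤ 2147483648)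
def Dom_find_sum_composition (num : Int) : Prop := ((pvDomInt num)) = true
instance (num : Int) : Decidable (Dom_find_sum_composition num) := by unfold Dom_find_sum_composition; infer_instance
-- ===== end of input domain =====

-- B replaces A's modular digit-extraction loop by one pass over the decimal string str(num)
-- (guarding num ≤ 0, where A's loop body never runs); same output, no speed claim.

-- ===== PORT A =====
-- the while-loop of A: state (sum_digit, compos_digit), recursion on num
def pvLoopA (num s p : Int) : Int × Int :=
  if _h : num > 0 then
    pvLoopA (PySem.Int.floordiv num 10) (s + PySem.Int.mod num 10) (p * PySem.Int.mod num 10)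
  else (s, p)
termination_by num.toNat
decreasing_by
  have h10 : PySem.Int.floordiv num 10 = num / 10 := PySem.Int.floordiv_eq_ediv_of_pos (by omega)
  rw [h10]; omega

def find_sum_composition (num : Int) : String :=
  let r := pvLoopA num 0 1
  "Сумма:" ++ PySem.Int.toStr r.1 ++ ", произведение:" ++ PySem.Int.toStr r.2

-- ===== PORT B =====
-- int(ch) for one character: exact on digit characters, the only ones str(num) has for num > 0
def pvDigitVal (ch : Char) : Int := ((ch.toNat - 48 : Nat) : Int)

def find_sum_composition_alt (num : Int) : String :=
  let r :=
    if num > 0 then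
      (PySem.Int.toChars num).foldl
        (fun (acc : Int × Int) ch => (acc.1 + pvDigitVal ch, acc.2 * pvDigitVal ch)) (0, 1)
    else ((0 : Int), (1 : Int))
  "Сумма:" ++ PySem.Int.toStr r.1 ++ ", произведение:" ++ PySem.Int.toStr r.2

-- ===== PRECONDITION & SPEC =====
def Spec_find_sum_composition (num : Int) (out : String) : Prop := out = find_sum_composition_alt num
instance (num : Int) (out : String) : Decidable (Spec_find_sum_composition num out) := by unfold Spec_find_sum_composition; infer_instance

-- ===== CLAIM (what is proved, stated in full; the proofs are below) =====
def Claim_equal_find_sum_composition : Prop := ∀ (num : Int), Dom_find_sum_composition num → Spec_find_sum_composition num (find_sum_composition num)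

-- ===== LEMMAS AND PROOFS =====

-- A's loop computes (s + Σ digits, p * Π digits) over the base-10 digits of num.toNat
theorem pvLoopA_eq_digits (n : Nat) : ∀ (s p : Int),
    pvLoopA (n : Int) s p =
      (s + ((Nat.digits 10 n).map (Int.ofNat)).sum, p * ((Nat.digits 10 n).map (Int.ofNat)).prod) := by
  induction n using Nat.strong_induction_on with
  | _ n ih =>
    intro s p
    rcases Nat.eq_zero_or_pos n with h0 | hpos
    · subst h0; rw [pvLoopA]; simp
    · rw [pvLoopA]
      have hgt : (n : Int) > 0 := by exact_mod_cast hpos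
      rw [dif_pos hgt]
      have hfd : PySem.Int.floordiv (n : Int) 10 = ((n / 10 : Nat) : Int) :=
        PySem.Int.floordiv_natCast n 10
      have hmd : PySem.Int.mod (n : Int) 10 = ((n % 10 : Nat) : Int) :=
        PySem.Int.mod_natCast n 10
      rw [hfd, hmd, ih (n / 10) (Nat.div_lt_self hpos (by norm_num)) _ _]
      rw [Nat.digits_def' (by norm_num : 1 < 10) hpos]
      simp [add_assoc, mul_assoc]

-- the core digit printer writes the digits of n (most significant first) before acc
theorem pvToDigitsCore_eq (f : Nat) : ∀ (n : Nat) (acc : List Char), 0 < n → n < f →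
    Nat.toDigitsCore 10 f n acc = ((Nat.digits 10 n).map Nat.digitChar).reverse ++ acc := by
  induction f with
  | zero => intro n acc h1 h2; omega
  | succ f ih =>
    intro n acc h1 h2
    simp only [Nat.toDigitsCore]
    rw [Nat.digits_def' (by norm_num : 1 < 10) h1]
    by_cases hq : n / 10 = 0
    · simp [hq, Nat.digits_zero]
    · rw [if_neg hq]
      rw [ih (n / 10) _ (Nat.pos_of_ne_zero hq) (by omega)]
      simp

-- pvDigitVal inverts digitChar on real digits
theorem pvDigitVal_digitChar (d : Nat) (hd : d < 10) :
    pvDigitVal (Nat.digitChar d) = (d : Int) := by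
  interval_cases d <;> decide

-- folding pvDigitVal over digitChar-mapped digits (in any order here: foldr) is (s+sum, p*prod)
theorem pvFoldChars (l : List Nat) (hlt : ∀ d ∈ l, d < 10) : ∀ (s p : Int),
    (l.map Nat.digitChar).foldr
      (fun ch (acc : Int × Int) => (acc.1 + pvDigitVal ch, acc.2 * pvDigitVal ch)) (s, p)
    = (s + (l.map Int.ofNat).sum, p * (l.map Int.ofNat).prod) := by
  induction l with
  | nil => intro s p; simp
  | cons x xs ih =>
    intro s p
    simp only [List.map_cons, List.foldr_cons]
    rw [ih (fun d hd => hlt d (List.mem_cons_of_mem _ hd))]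
    rw [pvDigitVal_digitChar x (hlt x List.mem_cons_self)]
    simp only [List.sum_cons, List.prod_cons, Prod.mk.injEq]
    constructor <;> (simp only [Int.ofNat_eq_natCast]; ring)

theorem find_sum_composition_spec : Claim_equal_find_sum_composition := by
  intro num _
  unfold Spec_find_sum_composition find_sum_composition find_sum_composition_alt
  by_cases h : num > 0
  · have hn : num = ((num.toNat : Nat) : Int) := (Int.toNat_of_nonneg (by omega)).symm
    have hpos : 0 < num.toNat := by omega
    have hchars : PySem.Int.toChars num = ((Nat.digits 10 num.toNat).map Nat.digitChar).reverse := by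
      unfold PySem.Int.toChars
      rw [if_neg (by omega), Nat.toDigits,
        pvToDigitsCore_eq (num.toNat + 1) num.toNat [] hpos (by omega)]
      simp
    have hA : pvLoopA num 0 1 =
        (0 + ((Nat.digits 10 num.toNat).map Int.ofNat).sum,
         1 * ((Nat.digits 10 num.toNat).map Int.ofNat).prod) := by
      conv_lhs => rw [hn]
      exact pvLoopA_eq_digits num.toNat 0 1
    have hB : (PySem.Int.toChars num).foldl
        (fun (acc : Int × Int) ch => (acc.1 + pvDigitVal ch, acc.2 * pvDigitVal ch)) (0, 1)
        = (0 + ((Nat.digits 10 num.toNat).map Int.ofNat).sum,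
           1 * ((Nat.digits 10 num.toNat).map Int.ofNat).prod) := by
      rw [hchars, List.foldl_reverse]
      exact pvFoldChars (Nat.digits 10 num.toNat)
        (fun d hd => Nat.digits_lt_base (by norm_num) hd) 0 1
    simp only [if_pos h, hA, hB]
  · simp only [if_neg h]
    rw [pvLoopA, dif_neg h]
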